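-- pv_equiv track=rewrite | github.com/ilo-lang/ilo | research/explorations/bench-realistic/listproc.py | bench
-- ===== SOURCE A (Python) =====
-- def lev(x):
--     if x >= 5000: return 5
--     if x >= 3000: return 4
--     if x >= 1000: return 3
--     if x >= 500: return 2
--     return 1
--
-- def bench(n):
--     s = 0
--     for i in range(n):
--         a = i * 3
--         b = a + 1
--         c = b * 2
--         d = lev(c)
--         s += d
--     return s
-- ===== SOURCE B (Python) =====
-- def bench(n):
--     # Closed form: level(6i+2) crosses thresholds at i = 83, 167, 500, 833;
--     # each crossing adds +1 per remaining element.
--     return sum(max(0, n - t) for t in (0, 83, 167, 500, 833))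
-- ===== Notes on version B (the rewrite author's own statement) =====
-- stated objective: faster
-- what changed: Replaced the O(n) loop summing step-function levels with a closed form: each threshold t contributes max(0, n-t), obtained by inverting lev's thresholds on c = 6i+2.
import Mathlib
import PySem

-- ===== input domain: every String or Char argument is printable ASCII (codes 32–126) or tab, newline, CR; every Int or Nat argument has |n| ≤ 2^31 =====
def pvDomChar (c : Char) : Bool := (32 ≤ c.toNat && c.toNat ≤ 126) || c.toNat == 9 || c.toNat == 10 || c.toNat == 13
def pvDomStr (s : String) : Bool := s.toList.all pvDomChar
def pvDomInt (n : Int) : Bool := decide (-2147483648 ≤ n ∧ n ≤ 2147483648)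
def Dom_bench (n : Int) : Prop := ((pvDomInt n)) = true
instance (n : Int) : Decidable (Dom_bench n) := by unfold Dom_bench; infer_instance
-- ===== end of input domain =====

-- B replaces A's O(n) accumulation loop with an O(1) closed form (threshold inversion).

-- ===== PORT A =====
def lev (x : Int) : Int :=
  if x ≥ 5000 then 5
  else if x ≥ 3000 then 4
  else if x ≥ 1000 then 3
  else if x ≥ 500 then 2
  else 1

def bench (n : Int) : Int :=
  (PySem.List.pyRange 0 n 1).foldl (fun s i =>
    let a := i * 3
    let b := a + 1
    let c := b * 2
    let d := lev c
    s + d) 0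

-- ===== PORT B =====
def bench_alt (n : Int) : Int :=
  ([0, 83, 167, 500, 833] : List Int).foldl (fun s t => s + max 0 (n - t)) 0

-- ===== PRECONDITION & SPEC =====
def Spec_bench (n : Int) (out : Int) : Prop := out = bench_alt n
instance (n : Int) (out : Int) : Decidable (Spec_bench n out) := by unfold Spec_bench; infer_instance

-- ===== CLAIM (what is proved, stated in full; the proofs are below) =====
def Claim_equal_bench : Prop := ∀ (n : Int), Dom_bench n → Spec_bench n (bench n)

-- ===== LEMMAS AND PROOFS =====

theorem bench_alt_closed (n : Int) :
    bench_alt n = max 0 n + max 0 (n - 83) + max 0 (n - 167) + max 0 (n - 500) + max 0 (n - 833) := by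
  simp [bench_alt, List.foldl]

theorem bench_nat (m : ℕ) : bench (m : Int) = bench_alt (m : Int) := by
  induction m with
  | zero => decide
  | succ k ih =>
    have hc : ((k + 1 : ℕ) : Int) = (k : Int) + 1 := by push_cast; ring
    rw [hc]
    have h : PySem.List.pyRange 0 ((k : Int) + 1) 1
        = PySem.List.pyRange 0 (k : Int) 1 ++ [(k : Int)] :=
      PySem.List.pyRange_one_succ_right (by positivity)
    have hk : bench ((k : Int) + 1) = bench (k : Int) + lev (((k : Int) * 3 + 1) * 2) := by
      simp [bench, h]
    rw [hk, ih, bench_alt_closed, bench_alt_closed]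
    unfold lev
    split_ifs <;> omega

-- ===== VERDICT (by name: the statement is the Claim_ definition above) =====
theorem bench_spec : Claim_equal_bench := by
  intro n _
  unfold Spec_bench
  rcases Int.lt_or_le 0 n with h | h
  · have hn : ((n.toNat : ℕ) : Int) = n := Int.toNat_of_nonneg h.le
    rw [← hn]
    exact bench_nat n.toNat
  · have hb : bench n = 0 := by
      simp [bench, PySem.List.pyRange_one_eq_nil h]
    rw [hb, bench_alt_closed]
    omega
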